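-- pv_equiv track=rewrite | github.com/mishka251/ro_tyan | main_ver2.py | get_fingerprint_match
-- ===== SOURCE A (Python) =====
-- from collections import defaultdict
--
-- def get_fingerprint_match(fp1, fp2):
--     base_fp_hash = defaultdict(list)
--     for time_index, freq_index in enumerate(fp1):
--         base_fp_hash[freq_index].append(time_index)
--     matches = [t - time_index  # разницы времен совпавших частот
--                for time_index, freq_index in enumerate(fp2)
--                for t in base_fp_hash[freq_index]]
--     return matches
-- ===== SOURCE B (Python) =====
-- def get_fingerprint_match(fp1, fp2):
--     # No hash index: a plain nested comprehension over both fingerprints.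
--     return [i - j
--             for j, f2 in enumerate(fp2)
--             for i, f1 in enumerate(fp1)
--             if f1 == f2]
-- ===== Notes on version B (the rewrite author's own statement) =====
-- stated objective: simpler
-- what changed: Replaced the defaultdict index built over fp1 plus lookup with a direct nested comprehension that rescans fp1 for each fp2 entry, producing the same list in the same order.
import Mathlib
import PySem

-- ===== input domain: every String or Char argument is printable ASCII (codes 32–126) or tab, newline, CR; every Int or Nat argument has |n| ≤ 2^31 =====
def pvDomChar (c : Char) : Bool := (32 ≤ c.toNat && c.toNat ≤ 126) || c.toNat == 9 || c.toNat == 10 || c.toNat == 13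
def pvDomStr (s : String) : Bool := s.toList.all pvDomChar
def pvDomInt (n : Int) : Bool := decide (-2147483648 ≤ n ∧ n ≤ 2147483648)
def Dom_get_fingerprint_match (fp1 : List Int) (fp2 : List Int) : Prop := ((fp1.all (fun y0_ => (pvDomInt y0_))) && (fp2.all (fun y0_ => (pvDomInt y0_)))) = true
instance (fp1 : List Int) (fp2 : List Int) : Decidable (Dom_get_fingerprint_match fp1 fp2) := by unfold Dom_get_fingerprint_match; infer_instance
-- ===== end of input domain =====

-- B drops A's defaultdict index and uses one nested comprehension over fp2 × fp1 (simpler, same output).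


-- ===== PORT A =====
def get_fingerprint_match (fp1 : List Int) (fp2 : List Int) : List Int :=
  let base_fp_hash : PySem.Dict Int (List Int) :=
    (PySem.List.enumerate fp1).foldl
      (fun d p => d.modify p.2 [] (fun l => l ++ [p.1])) PySem.Dict.empty
  (PySem.List.enumerate fp2).flatMap
    (fun p => (base_fp_hash.getD p.2 []).map (fun t => t - p.1))

-- ===== PORT B =====
def get_fingerprint_match_alt (fp1 : List Int) (fp2 : List Int) : List Int :=
  (PySem.List.enumerate fp2).flatMap
    (fun p => ((PySem.List.enumerate fp1).filter (fun q => q.2 == p.2)).map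
      (fun q => q.1 - p.1))

-- ===== PRECONDITION & SPEC =====
def Spec_get_fingerprint_match (fp1 : List Int) (fp2 : List Int) (out : List Int) : Prop := out = get_fingerprint_match_alt fp1 fp2
instance (fp1 : List Int) (fp2 : List Int) (out : List Int) : Decidable (Spec_get_fingerprint_match fp1 fp2 out) := by unfold Spec_get_fingerprint_match; infer_instance

-- ===== CLAIM (what is proved, stated in full; the proofs are below) =====
def Claim_equal_get_fingerprint_match : Prop := ∀ (fp1 : List Int) (fp2 : List Int), Dom_get_fingerprint_match fp1 fp2 → Spec_get_fingerprint_match fp1 fp2 (get_fingerprint_match fp1 fp2)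

-- ===== LEMMAS AND PROOFS =====

-- A's hash lookup at key c yields exactly the fp1 indices whose frequency is c, in order.
theorem hash_getD_eq (fp1 : List Int) (c : Int) :
    (((PySem.List.enumerate fp1).foldl
        (fun (d : PySem.Dict Int (List Int)) p => d.modify p.2 [] (fun l => l ++ [p.1]))
        PySem.Dict.empty).getD c [])
      = (((PySem.List.enumerate fp1).filter (fun q => q.2 == c)).map (fun q => q.1)) := by
  have h := PySem.Dict.getD_foldl_modify_append
      (l := (PySem.List.enumerate fp1).map Prod.swap)
      (d := (PySem.Dict.empty : PySem.Dict Int (List Int))) (c := c)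
  rw [List.foldl_map] at h
  simp only [Prod.swap] at h
  rw [h, List.filter_map, List.map_map]
  simp [PySem.Dict.getD_empty, Function.comp_def]

-- ===== VERDICT (by name: the statement is the Claim_ definition above) =====
theorem get_fingerprint_match_spec : Claim_equal_get_fingerprint_match := by
  intro fp1 fp2 _
  unfold Spec_get_fingerprint_match get_fingerprint_match get_fingerprint_match_alt
  simp only [hash_getD_eq, List.map_map]
  rfl
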